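-- pv_equiv track=rewrite | github.com/Valentina17varela/Universidad-Tecnologica-de-Pereira | RR/Round-Robin.py | findWaitng
-- ===== SOURCE A (Python) =====
-- def findWaitng(process, n, burst, wordtime,quantum):
--     memory_burst = [0] * n
--     intervalos = [[]  for i in range(len(process))]
--     proceso = 0
--
--     for i in range(n):
--         memory_burst[i] = burst[i]
--
--     t = 0
--
--
--
--     while(1):
--         done = True
--
--         for i in range(n):
--
--             if proceso > len(process) - 1:
--                 proceso = 0
--
--             if (memory_burst[i] > 0):
--                 done = False
--
--                 if (memory_burst[i] > quantum):
--
--                     intervalos[proceso].append(t)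
--
--                     t += quantum
--
--                     memory_burst[i] -= quantum
--
--                     intervalos[proceso].append(t)
--
--                 else:
--
--                     intervalos[proceso].append(t)
--
--                     t = t + memory_burst[i]
--
--                     intervalos[proceso].append(t)
--
--                     wordtime[i] = t - burst[i]
--
--                     memory_burst[i] = 0
--
--             proceso += 1
--
--         if (done == True):
--             return intervalos
-- ===== SOURCE B (Python) =====
-- def findWaitng(process, n, burst, wordtime, quantum):
--     # Round-robin via an explicit queue of still-active (index, remaining) pairs:
--     # finished processes are skipped instead of rescanned each round; the slot
--     # index k = round*n + i reproduces A's global step counter (proceso mod len(process)).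
--     m = len(process)
--     intervalos = [[] for _ in range(m)]
--     active = [(i, burst[i]) for i in range(n) if burst[i] > 0]
--     t = 0
--     r = 0
--     while active:
--         nxt = []
--         for i, rem in active:
--             k = r * n + i
--             sl = rem if rem <= quantum else quantum
--             lst = intervalos[k % m]
--             lst.append(t)
--             t += sl
--             lst.append(t)
--             if rem <= quantum:
--                 wordtime[i] = t - burst[i]
--             else:
--                 nxt.append((i, rem - quantum))
--         active = nxt
--         r += 1
--     return intervalos
-- ===== Notes on version B (the rewrite author's own statement) =====
-- stated objective: alternative
-- what changed: Replaces A's endless while-loop that rescans all n burst slots every round (with a done flag, a mutated memory array and a wrap-around proceso counter) by an explicit queue of still-active (index, remaining) pairs that drops finished processes, computing each slot index directly as (round*n + i) mod len(process).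
import Mathlib
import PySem

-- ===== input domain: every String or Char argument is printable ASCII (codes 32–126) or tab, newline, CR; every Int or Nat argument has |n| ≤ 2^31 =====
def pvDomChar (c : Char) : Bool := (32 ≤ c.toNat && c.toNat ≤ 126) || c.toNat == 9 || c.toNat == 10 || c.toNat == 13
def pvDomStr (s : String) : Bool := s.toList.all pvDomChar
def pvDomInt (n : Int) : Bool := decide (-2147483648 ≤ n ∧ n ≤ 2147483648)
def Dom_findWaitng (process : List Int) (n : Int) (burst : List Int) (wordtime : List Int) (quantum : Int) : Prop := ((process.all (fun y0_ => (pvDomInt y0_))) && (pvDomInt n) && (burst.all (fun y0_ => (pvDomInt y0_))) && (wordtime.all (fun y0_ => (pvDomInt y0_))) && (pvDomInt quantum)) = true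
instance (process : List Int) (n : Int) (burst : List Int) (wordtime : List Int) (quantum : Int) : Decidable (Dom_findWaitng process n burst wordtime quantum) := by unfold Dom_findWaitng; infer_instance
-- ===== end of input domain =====

-- B replaces A's endless full rescan of all n slots per round by a queue of still-active
-- (index, remaining) pairs, skipping finished processes (objective: alternative algorithm).
-- A mutates `wordtime` in place; B performs the same mutation in Python, but the equivalence
-- proved here is about the RETURN value only (the Lean ports drop that dead store).

-- ===== PORT A =====
-- loop state: (done, memory_burst, intervalos, proceso, t)
def stepA (m quantum : Int) (s : Bool × List Int × List (List Int) × Int × Int) (i : Nat) :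
    Bool × List Int × List (List Int) × Int × Int :=
  let (done, mb, iv, p, t) := s
  let p := if p > m - 1 then 0 else p          -- if proceso > len(process)-1: proceso = 0
  let b := mb.getD i 0                         -- memory_burst[i] (i < len, so default unused)
  if b > 0 then
    if b > quantum then
      -- p ≥ 0 here whenever Python does not raise, so .toNat is exact
      (false, mb.set i (b - quantum), iv.modify p.toNat (fun l => l ++ [t, t + quantum]), p + 1, t + quantum)
    else
      (false, mb.set i 0, iv.modify p.toNat (fun l => l ++ [t, t + b]), p + 1, t + b)
  else (done, mb, iv, p + 1, t)

-- the while(1) loop; fuel = (sum of remaining bursts) + 1 rounds always suffices when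
-- quantum ≥ 1 (each working round shrinks the sum); outside Pre_ Python loops forever/raises
def loopA (nN : Nat) (m quantum : Int) : Nat → List Int → List (List Int) → Int → Int → List (List Int)
  | 0, _, iv, _, _ => iv
  | fuel+1, mb, iv, p, t =>
    let s := (List.range nN).foldl (stepA m quantum) (true, mb, iv, p, t)
    if s.1 then s.2.2.1 else loopA nN m quantum fuel s.2.1 s.2.2.1 s.2.2.2.1 s.2.2.2.2

def sumFuel (mb : List Int) : Nat := (mb.map Int.toNat).sum

def findWaitng (process : List Int) (n : Int) (burst : List Int) (wordtime : List Int) (quantum : Int) : List (List Int) :=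
  let nN := n.toNat
  let memory0 : List Int := List.replicate nN 0                              -- [0] * n
  let intervalos : List (List Int) := (List.range process.length).map (fun _ => [])
  let mb := (List.range nN).foldl (fun mb i => mb.set i (burst.getD i 0)) memory0  -- memory_burst[i] = burst[i]
  loopA nN (process.length : Int) quantum (sumFuel mb + 1) mb intervalos 0 0

-- ===== PORT B =====
-- round state: (nxt, intervalos, t)
def stepB (m n quantum r : Int) (s : List (Int × Int) × List (List Int) × Int) (pr : Int × Int) :
    List (Int × Int) × List (List Int) × Int :=
  let (nxt, iv, t) := s
  let (i, rem) := pr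
  let k := r * n + i
  let sl := if rem ≤ quantum then rem else quantum
  let iv := iv.modify (PySem.Int.mod k m).toNat (fun l => l ++ [t, t + sl])  -- intervalos[k % m]
  if rem ≤ quantum then (nxt, iv, t + sl) else (nxt ++ [(i, rem - quantum)], iv, t + sl)

-- while active: ...; fuel = (sum of active remainders) + 1 suffices when quantum ≥ 1
def loopB (m n quantum : Int) : Nat → Int → List (Int × Int) → List (List Int) → Int → List (List Int)
  | 0, _, _, iv, _ => iv
  | fuel+1, r, active, iv, t =>
    if active.isEmpty then iv
    else
      let s := active.foldl (stepB m n quantum r) ([], iv, t)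
      loopB m n quantum fuel (r+1) s.1 s.2.1 s.2.2

def findWaitng_alt (process : List Int) (n : Int) (burst : List Int) (wordtime : List Int) (quantum : Int) : List (List Int) :=
  let m : Int := (process.length : Int)
  let intervalos : List (List Int) := (List.range process.length).map (fun _ => [])
  let active := (List.range n.toNat).filterMap (fun i =>
      let b := burst.getD i 0
      if b > 0 then some ((i : Int), b) else none)
  loopB m n quantum ((active.map (fun pr => pr.2.toNat)).sum + 1) 0 active intervalos 0

-- ===== PRECONDITION & SPEC =====
-- Pre_ excludes only inputs on which Python A raises (IndexError: n > len(burst); empty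
-- process list or n > len(wordtime) while work exists) or loops forever (quantum < 1 with work).
def Pre_findWaitng (process : List Int) (n : Int) (burst : List Int) (wordtime : List Int) (quantum : Int) : Prop :=
  n ≤ (burst.length : Int) ∧
  ((∃ b ∈ burst.take n.toNat, 0 < b) →
    1 ≤ quantum ∧ process ≠ [] ∧ n ≤ (wordtime.length : Int))
instance (process : List Int) (n : Int) (burst : List Int) (wordtime : List Int) (quantum : Int) : Decidable (Pre_findWaitng process n burst wordtime quantum) := by unfold Pre_findWaitng; infer_instance

def pvWitness_findWaitng : List Int × Int × List Int × List Int × Int := ([7, 9], 2, [3, 5], [0, 0], 2)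

def Spec_findWaitng (process : List Int) (n : Int) (burst : List Int) (wordtime : List Int) (quantum : Int) (out : List (List Int)) : Prop := out = findWaitng_alt process n burst wordtime quantum
instance (process : List Int) (n : Int) (burst : List Int) (wordtime : List Int) (quantum : Int) (out : List (List Int)) : Decidable (Spec_findWaitng process n burst wordtime quantum out) := by unfold Spec_findWaitng; infer_instance

-- ===== CLAIM (what is proved, stated in full; the proofs are below) =====
def Claim_equal_findWaitng : Prop := ∀ (process : List Int) (n : Int) (burst : List Int) (wordtime : List Int) (quantum : Int), Dom_findWaitng process n burst wordtime quantum → Pre_findWaitng process n burst wordtime quantum → Spec_findWaitng process n burst wordtime quantum (findWaitng process n burst wordtime quantum)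

-- ===== LEMMAS AND PROOFS =====

-- structural version of A's inner for-loop (consumes memory_burst element by element)
def Around (m quantum : Int) : List Int → Bool → List (List Int) → Int → Int →
    Bool × List Int × List (List Int) × Int × Int
  | [], done, iv, p, t => (done, [], iv, p, t)
  | b :: rest, done, iv, p, t =>
    let p0 := if p > m - 1 then 0 else p
    if b > 0 then
      let sl := if b > quantum then quantum else b
      let b' := if b > quantum then b - quantum else 0
      let s := Around m quantum rest false (iv.modify p0.toNat (fun l => l ++ [t, t + sl])) (p0 + 1) (t + sl)
      (s.1, b' :: s.2.1, s.2.2)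
    else
      let s := Around m quantum rest done iv (p0 + 1) t
      (s.1, b :: s.2.1, s.2.2)

-- the (index, remaining) pairs of the still-active processes, indices from a
def activePairs : Int → List Int → List (Int × Int)
  | _, [] => []
  | a, b :: rest => if 0 < b then (a, b) :: activePairs (a + 1) rest else activePairs (a + 1) rest

-- invariant tying A's carried `proceso` to the global step counter k
def pInv (m p k : Int) : Prop := p = k % m ∨ (p = m ∧ k % m = 0)

lemma pInv_get (m p k : Int) (hm : 0 < m) (h : pInv m p k) :
    (if p > m - 1 then 0 else p) = k % m := by
  have h1 := Int.emod_nonneg k (by omega : m ≠ 0)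
  have h2 := Int.emod_lt_of_pos k hm
  rcases h with h | ⟨h, h0⟩ <;> split_ifs <;> omega

lemma pInv_step (m p k : Int) (hm : 0 < m) (h : pInv m p k) :
    pInv m ((if p > m - 1 then 0 else p) + 1) (k + 1) := by
  rw [pInv_get m p k hm h]
  have h1 := Int.emod_nonneg k (by omega : m ≠ 0)
  have h2 := Int.emod_lt_of_pos k hm
  have h3 : (k + 1) % m = (k % m + 1) % m := by
    rw [Int.add_emod, Int.add_emod (k % m) 1 m, Int.emod_emod_of_dvd k (dvd_refl m)]
  unfold pInv
  by_cases hlt : k % m + 1 < m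
  · left; rw [h3, Int.emod_eq_of_lt (by omega) hlt]
  · right
    have he : k % m + 1 = m := by omega
    constructor
    · omega
    · rw [h3, he, Int.emod_self]

lemma foldA_eq_around (m quantum : Int) :
    ∀ (rest pre : List Int) (done : Bool) (iv : List (List Int)) (p t : Int),
    (List.range' pre.length rest.length).foldl (stepA m quantum) (done, pre ++ rest, iv, p, t)
      = (let s := Around m quantum rest done iv p t; (s.1, pre ++ s.2.1, s.2.2)) := by
  intro rest
  induction rest with
  | nil => intro pre done iv p t; simp [Around]
  | cons b rest ih =>
    intro pre done iv p t
    simp only [List.length_cons, List.range'_succ, List.foldl_cons]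
    have hget : (pre ++ b :: rest).getD pre.length 0 = b := by
      simp [List.getD_eq_getElem?_getD]
    have hset : ∀ v : Int, (pre ++ b :: rest).set pre.length v = pre ++ v :: rest := by
      intro v; simp
    show (List.range' (pre.length + 1) rest.length).foldl (stepA m quantum)
        (stepA m quantum (done, pre ++ b :: rest, iv, p, t) pre.length) = _
    simp only [stepA, hget, hset]
    simp only [Around]
    by_cases hb : b > 0
    · by_cases hqq : b > quantum
      · simp only [hb, hqq, if_true]
        have := ih (pre ++ [b - quantum]) false
          ((iv.modify (if p > m - 1 then 0 else p).toNat (fun l => l ++ [t, t + quantum])))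
          ((if p > m - 1 then 0 else p) + 1) (t + quantum)
        simp only [List.length_append, List.length_cons, List.length_nil, List.append_assoc,
          List.singleton_append, Nat.zero_add] at this
        rw [this]
      · simp only [hb, hqq, if_true, if_false]
        have := ih (pre ++ [(0 : Int)]) false
          ((iv.modify (if p > m - 1 then 0 else p).toNat (fun l => l ++ [t, t + b])))
          ((if p > m - 1 then 0 else p) + 1) (t + b)
        simp only [List.length_append, List.length_cons, List.length_nil, List.append_assoc,
          List.singleton_append, Nat.zero_add] at this
        rw [this]
    · simp only [hb, if_false]
      have := ih (pre ++ [b]) done iv ((if p > m - 1 then 0 else p) + 1) t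
      simp only [List.length_append, List.length_cons, List.length_nil, List.append_assoc,
        List.singleton_append, Nat.zero_add] at this
      rw [this]

lemma activePairs_cons_pos (a b : Int) (rest : List Int) (h : 0 < b) :
    activePairs a (b :: rest) = (a, b) :: activePairs (a + 1) rest := by
  simp [activePairs, h]

lemma activePairs_cons_nonpos (a b : Int) (rest : List Int) (h : ¬ 0 < b) :
    activePairs a (b :: rest) = activePairs (a + 1) rest := by
  simp [activePairs, h]

lemma around_corr (m n quantum : Int) (hm : 0 < m) (hq : 1 ≤ quantum) (r : Int) :
    ∀ (mb : List Int) (i0 : Int) (done : Bool) (iv : List (List Int)) (p t : Int) (nxt : List (Int × Int)),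
    pInv m p (r * n + i0) →
    ((activePairs i0 mb).foldl (stepB m n quantum r) (nxt, iv, t)
        = (nxt ++ activePairs i0 (Around m quantum mb done iv p t).2.1,
           (Around m quantum mb done iv p t).2.2.1,
           (Around m quantum mb done iv p t).2.2.2.2))
    ∧ (Around m quantum mb done iv p t).1 = (done && (activePairs i0 mb).isEmpty)
    ∧ (Around m quantum mb done iv p t).2.1.length = mb.length
    ∧ pInv m (Around m quantum mb done iv p t).2.2.2.1 (r * n + i0 + mb.length)
    ∧ sumFuel (Around m quantum mb done iv p t).2.1 ≤ sumFuel mb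
    ∧ (activePairs i0 mb ≠ [] → sumFuel (Around m quantum mb done iv p t).2.1 < sumFuel mb) := by
  intro mb
  induction mb with
  | nil =>
    intro i0 done iv p t nxt hp
    refine ⟨by simp [activePairs, Around], by simp [activePairs, Around], rfl, ?_, le_refl _, ?_⟩
    · simpa [Around] using hp
    · intro h; exact absurd rfl h
  | cons b rest ih =>
    intro i0 done iv p t nxt hp
    have he : (if p > m - 1 then 0 else p) = (r * n + i0) % m := pInv_get m p _ hm hp
    have hp' : pInv m ((if p > m - 1 then 0 else p) + 1) (r * n + (i0 + 1)) := by
      have := pInv_step m p (r * n + i0) hm hp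
      rwa [show r * n + (i0 + 1) = r * n + i0 + 1 by ring]
    have hmod : PySem.Int.mod (r * n + i0) m = (r * n + i0) % m :=
      PySem.Int.mod_eq_emod_of_pos hm
    have hlen : r * n + i0 + ((b :: rest).length : Int) = r * n + (i0 + 1) + (rest.length : Int) := by
      push_cast [List.length_cons]; ring
    by_cases hb : 0 < b
    · by_cases hqq : b > quantum
      · -- active, not finishing: slice = quantum
        obtain ⟨c1, c2, c3, c4, c5, c6⟩ :=
          ih (i0 + 1) false
            (iv.modify (if p > m - 1 then 0 else p).toNat (fun l => l ++ [t, t + quantum]))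
            ((if p > m - 1 then 0 else p) + 1) (t + quantum) (nxt ++ [(i0, b - quantum)]) hp'
        have hbq : 0 < b - quantum := by omega
        have hstep : stepB m n quantum r (nxt, iv, t) (i0, b)
            = (nxt ++ [(i0, b - quantum)],
               iv.modify (if p > m - 1 then 0 else p).toNat (fun l => l ++ [t, t + quantum]),
               t + quantum) := by
          simp only [stepB, hmod, he]
          rw [if_neg (by omega), if_neg (by omega)]
        refine ⟨?_, ?_, ?_, ?_, ?_, ?_⟩
        · rw [activePairs_cons_pos _ _ _ hb, List.foldl_cons, hstep, c1]
          simp only [Around, if_pos hb, if_pos hqq]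
          rw [activePairs_cons_pos _ _ _ hbq]
          simp [List.append_assoc]
        · simp only [Around, if_pos hb, if_pos hqq]
          rw [c2, activePairs_cons_pos _ _ _ hb]
          simp
        · simp only [Around, if_pos hb, if_pos hqq, List.length_cons]
          rw [c3]
        · simp only [Around, if_pos hb, if_pos hqq]
          rw [hlen]; exact c4
        · simp only [Around, if_pos hb, if_pos hqq, sumFuel, List.map, List.sum_cons]
          have hle : (b - quantum).toNat ≤ b.toNat := by omega
          have c5' := c5; simp only [sumFuel] at c5'
          omega
        · intro _
          simp only [Around, if_pos hb, if_pos hqq, sumFuel, List.map, List.sum_cons]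
          have hlt : (b - quantum).toNat < b.toNat := by omega
          have c5' := c5; simp only [sumFuel] at c5'
          omega
      · -- active, finishing: slice = remaining burst, remainder becomes 0
        obtain ⟨c1, c2, c3, c4, c5, c6⟩ :=
          ih (i0 + 1) false
            (iv.modify (if p > m - 1 then 0 else p).toNat (fun l => l ++ [t, t + b]))
            ((if p > m - 1 then 0 else p) + 1) (t + b) nxt hp'
        have hstep : stepB m n quantum r (nxt, iv, t) (i0, b)
            = (nxt,
               iv.modify (if p > m - 1 then 0 else p).toNat (fun l => l ++ [t, t + b]),
               t + b) := by
          simp only [stepB, hmod, he]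
          rw [if_pos (by omega), if_pos (by omega)]
        refine ⟨?_, ?_, ?_, ?_, ?_, ?_⟩
        · rw [activePairs_cons_pos _ _ _ hb, List.foldl_cons, hstep, c1]
          simp only [Around, if_pos hb, if_neg hqq]
          rw [activePairs_cons_nonpos _ _ _ (by omega)]
        · simp only [Around, if_pos hb, if_neg hqq]
          rw [c2, activePairs_cons_pos _ _ _ hb]
          simp
        · simp only [Around, if_pos hb, if_neg hqq, List.length_cons]
          rw [c3]
        · simp only [Around, if_pos hb, if_neg hqq]
          rw [hlen]; exact c4
        · simp only [Around, if_pos hb, if_neg hqq, sumFuel, List.map, List.sum_cons]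
          have c5' := c5; simp only [sumFuel] at c5'
          omega
        · intro _
          simp only [Around, if_pos hb, if_neg hqq, sumFuel, List.map, List.sum_cons]
          have c5' := c5; simp only [sumFuel] at c5'
          omega
    · -- finished process: skipped by B, no-op for A
      obtain ⟨c1, c2, c3, c4, c5, c6⟩ :=
        ih (i0 + 1) done iv ((if p > m - 1 then 0 else p) + 1) t nxt hp'
      refine ⟨?_, ?_, ?_, ?_, ?_, ?_⟩
      · rw [activePairs_cons_nonpos _ _ _ hb, c1]
        simp only [Around, if_neg hb]
        rw [activePairs_cons_nonpos _ _ _ hb]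
      · simp only [Around, if_neg hb]
        rw [c2, activePairs_cons_nonpos _ _ _ hb]
      · simp only [Around, if_neg hb, List.length_cons]
        rw [c3]
      · simp only [Around, if_neg hb]
        rw [hlen]; exact c4
      · simp only [Around, if_neg hb, sumFuel, List.map, List.sum_cons]
        have c5' := c5; simp only [sumFuel] at c5'
        omega
      · intro hne
        rw [activePairs_cons_nonpos _ _ _ hb] at hne
        have c6' := c6 hne
        simp only [Around, if_neg hb, sumFuel, List.map, List.sum_cons]
        simp only [sumFuel] at c6'
        have hb0 : b.toNat = 0 := by omega
        omega

lemma around_idle (m quantum : Int) :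
    ∀ (mb : List Int) (done : Bool) (iv : List (List Int)) (p t : Int),
    (∀ b ∈ mb, ¬ 0 < b) →
    (Around m quantum mb done iv p t).1 = done ∧ (Around m quantum mb done iv p t).2.2.1 = iv := by
  intro mb
  induction mb with
  | nil => intro done iv p t _; simp [Around]
  | cons b rest ih =>
    intro done iv p t h
    have hb : ¬ 0 < b := h b (by simp)
    simp only [Around, if_neg hb]
    exact ih done iv _ t (fun x hx => h x (by simp [hx]))

lemma activePairs_nil (mb : List Int) (h : ∀ b ∈ mb, ¬ 0 < b) : ∀ a, activePairs a mb = [] := by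
  induction mb with
  | nil => intro a; rfl
  | cons b rest ih =>
    intro a
    have hb : ¬ 0 < b := h b (by simp)
    simp only [activePairs, if_neg hb]
    exact ih (fun x hx => h x (by simp [hx])) (a + 1)

lemma sumFuel_active (mb : List Int) : ∀ a, ((activePairs a mb).map (fun pr => pr.2.toNat)).sum = sumFuel mb := by
  induction mb with
  | nil => intro a; rfl
  | cons b rest ih =>
    intro a
    by_cases hb : 0 < b
    · simp only [activePairs, if_pos hb, List.map_cons, List.sum_cons, sumFuel, List.map, List.sum_cons]
      rw [ih (a + 1)]; rfl
    · have hb0 : b.toNat = 0 := by omega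
      simp only [activePairs, if_neg hb, sumFuel, List.map, List.sum_cons, hb0]
      rw [ih (a + 1)]; simp [sumFuel]

lemma sumFuel_zero (mb : List Int) (h : ∀ b ∈ mb, ¬ 0 < b) : sumFuel mb = 0 := by
  unfold sumFuel
  apply List.sum_eq_zero
  intro x hx
  obtain ⟨b, hb, rfl⟩ := List.mem_map.mp hx
  have := h b hb
  omega

lemma loop_corr (m n quantum : Int) (hm : 0 < m) (hq : 1 ≤ quantum) (nN : Nat) (hn : n = (nN : Int)) :
    ∀ (fuelA fuelB : Nat) (r : Int) (mb : List Int) (iv : List (List Int)) (p t : Int),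
    mb.length = nN → pInv m p (r * n) → sumFuel mb < fuelA → sumFuel mb < fuelB →
    loopA nN m quantum fuelA mb iv p t = loopB m n quantum fuelB r (activePairs 0 mb) iv t := by
  intro fuelA
  induction fuelA with
  | zero => intro fuelB r mb iv p t hlen hp ha hb; omega
  | succ f ihf =>
    intro fuelB r mb iv p t hlen hp ha hb
    have hp0 : pInv m p (r * n + 0) := by rwa [add_zero]
    obtain ⟨c1, c2, c3, c4, c5, c6⟩ := around_corr m n quantum hm hq r mb 0 true iv p t [] hp0
    have hfold : (List.range nN).foldl (stepA m quantum) (true, mb, iv, p, t)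
        = ((Around m quantum mb true iv p t).1,
           (Around m quantum mb true iv p t).2.1,
           (Around m quantum mb true iv p t).2.2) := by
      have := foldA_eq_around m quantum mb [] true iv p t
      simpa [List.range_eq_range', hlen] using this
    obtain ⟨g, rfl⟩ : ∃ g, fuelB = g + 1 := ⟨fuelB - 1, by omega⟩
    simp only [loopA, loopB, hfold]
    by_cases hemp : activePairs 0 mb = []
    · have hdone : (Around m quantum mb true iv p t).1 = true := by
        rw [c2, hemp]; rfl
      rw [hemp] at c1
      simp only [List.foldl_nil] at c1
      have hiv : (Around m quantum mb true iv p t).2.2.1 = iv := by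
        have := congrArg (fun x => x.2.1) c1
        simpa using this.symm
      rw [hdone, hemp]
      simpa using hiv
    · have hne : (activePairs 0 mb).isEmpty = false := by
        simpa [List.isEmpty_iff] using hemp
      have hdone : (Around m quantum mb true iv p t).1 = false := by
        rw [c2, hne]; rfl
      rw [hdone, hne]
      simp only [List.nil_append] at c1
      simp only [if_false, Bool.false_eq_true, c1]
      apply ihf
      · rw [c3, hlen]
      · have := c4
        rwa [show r * n + 0 + (mb.length : Int) = (r + 1) * n by rw [hlen, ← hn]; ring] at this
      · have := c6 hemp; omega
      · have := c6 hemp; omega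

lemma set_at_boundary (l1 l2 : List Int) (x v : Int) :
    (l1 ++ x :: l2).set l1.length v = l1 ++ v :: l2 := by
  simp

lemma init_mb (burst : List Int) (nN : Nat) (h : nN ≤ burst.length) :
    (List.range nN).foldl (fun mb i => mb.set i (burst.getD i 0)) (List.replicate nN 0) = burst.take nN := by
  suffices h2 : ∀ j, j ≤ nN →
      (List.range j).foldl (fun mb i => mb.set i (burst.getD i 0)) (List.replicate nN 0)
        = burst.take j ++ List.replicate (nN - j) 0 by
    have := h2 nN le_rfl
    simpa using this
  intro j
  induction j with
  | zero => intro _; simp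
  | succ j ihj =>
    intro hj
    rw [List.range_succ, List.foldl_append, ihj (by omega), List.foldl_cons, List.foldl_nil]
    have hjl : j < burst.length := by omega
    have hlt : (burst.take j).length = j := by
      rw [List.length_take]; omega
    have hrepl : List.replicate (nN - j) (0 : Int) = 0 :: List.replicate (nN - (j + 1)) 0 := by
      rw [← List.replicate_succ]; congr 1; omega
    rw [hrepl]
    have hset := set_at_boundary (burst.take j) (List.replicate (nN - (j + 1)) 0) 0 (burst.getD j 0)
    rw [hlt] at hset
    have hgetd : burst.getD j 0 = burst[j] := by
      simp [List.getD_eq_getElem?_getD, hjl]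
    have htake : List.take (j + 1) burst = List.take j burst ++ [burst[j]] := by
      rw [List.take_succ]; simp [List.getElem?_eq_getElem hjl]
    rw [hset, hgetd, htake, List.append_assoc, List.singleton_append]

lemma active_init_aux (burst : List Int) :
    ∀ (len aN : Nat), aN + len ≤ burst.length →
    (List.range' aN len).filterMap (fun i =>
        let b := burst.getD i 0
        if b > 0 then some ((i : Int), b) else none)
      = activePairs (aN : Int) ((burst.drop aN).take len) := by
  intro len
  induction len with
  | zero => intro aN _; simp [activePairs]
  | succ len ihl =>
    intro aN h
    rw [List.range'_succ, List.filterMap_cons]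
    have haN : aN < burst.length := by omega
    have hdrop : burst.drop aN = burst[aN] :: burst.drop (aN + 1) := by
      rw [List.drop_eq_getElem_cons haN]
    have hget : burst.getD aN 0 = burst[aN] := by
      simp [List.getD_eq_getElem?_getD, haN]
    rw [hdrop, List.take_succ_cons]
    have hrec := ihl (aN + 1) (by omega)
    by_cases hb : burst[aN] > 0
    · simp only [hget, hb, if_pos]
      rw [activePairs_cons_pos _ _ _ hb, hrec]
      norm_num
    · simp only [hget, hb, if_neg, if_false]
      rw [activePairs_cons_nonpos _ _ _ hb, hrec]
      norm_num

lemma active_init (burst : List Int) (nN : Nat) (h : nN ≤ burst.length) :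
    (List.range nN).filterMap (fun i =>
        let b := burst.getD i 0
        if b > 0 then some ((i : Int), b) else none)
      = activePairs 0 (burst.take nN) := by
  have := active_init_aux burst nN 0 (by omega)
  simpa [List.range_eq_range'] using this

-- ===== VERDICT (by name: the statement is the Claim_ definition above) =====
theorem findWaitng_spec : Claim_equal_findWaitng := by
  unfold Claim_equal_findWaitng
  intro process n burst wordtime quantum _ hpre
  obtain ⟨hn, hwork⟩ := hpre
  unfold Spec_findWaitng findWaitng findWaitng_alt
  dsimp only
  have hnN : n.toNat ≤ burst.length := by omega
  rw [init_mb burst n.toNat hnN, active_init burst n.toNat hnN, sumFuel_active (burst.take n.toNat) 0]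
  by_cases hw : ∃ b ∈ burst.take n.toNat, 0 < b
  · obtain ⟨hq, hproc, _⟩ := hwork hw
    have hm : 0 < ((process.length : Nat) : Int) := by
      have : 0 < process.length := List.length_pos_iff.mpr hproc
      omega
    have hmbne : burst.take n.toNat ≠ [] := by
      obtain ⟨b, hbmem, _⟩ := hw
      intro hcon; rw [hcon] at hbmem; simp at hbmem
    have hnpos : 0 < n.toNat := by
      have h1 : 0 < (burst.take n.toNat).length := List.length_pos_iff.mpr hmbne
      rw [List.length_take] at h1; omega
    have hneq : n = (n.toNat : Int) := by omega
    exact loop_corr (process.length : Int) n quantum hm hq n.toNat hneq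
      (sumFuel (burst.take n.toNat) + 1) (sumFuel (burst.take n.toNat) + 1) 0 (burst.take n.toNat)
      ((List.range process.length).map (fun _ => [])) 0 0
      (by rw [List.length_take]; omega)
      (by unfold pInv; left; simp)
      (by omega) (by omega)
  · push_neg at hw
    have hap : activePairs 0 (burst.take n.toNat) = []
      := activePairs_nil (burst.take n.toNat) (fun b hb => by have := hw b hb; omega) 0
    have hsf : sumFuel (burst.take n.toNat) = 0 :=
      sumFuel_zero _ (fun b hb => by have := hw b hb; omega)
    rw [hsf, hap]
    simp only [loopA, loopB, List.isEmpty_nil, if_true]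
    have hlen : (burst.take n.toNat).length = n.toNat := by rw [List.length_take]; omega
    have hfold := foldA_eq_around ((process.length : Nat) : Int) quantum (burst.take n.toNat) []
      true ((List.range process.length).map (fun _ => [])) 0 0
    simp only [List.nil_append, List.length_nil, ← List.range_eq_range', hlen] at hfold
    have hidle := around_idle ((process.length : Nat) : Int) quantum (burst.take n.toNat)
      true ((List.range process.length).map (fun _ => [])) 0 0
      (fun b hb => by have := hw b hb; omega)
    rw [hfold]
    simp only [ite_self]
    exact hidle.2
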